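-- pv_equiv track=rewrite | github.com/taoforge/taoforge-core | scripts/push_results.py | compute_streak
-- ===== SOURCE A (Python) =====
-- def compute_streak(cycles: list) -> int:
--     """Count consecutive accepted cycles from the end of the run."""
--     streak = 0
--     for c in reversed(cycles):
--         if c.get("accepted"):
--             streak += 1
--         else:
--             break
--     return streak
-- ===== SOURCE B (Python) =====
-- def compute_streak(cycles: list) -> int:
--     streak = 0
--     for c in cycles:
--         if c.get("accepted"):
--             streak += 1
--         else:
--             streak = 0
--     return streak
-- ===== Notes on version B (the rewrite author's own statement) =====
-- stated objective: alternative
-- what changed: Single forward pass with an accumulate/reset counter instead of iterating the reversed list with an early break.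
import Mathlib
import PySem

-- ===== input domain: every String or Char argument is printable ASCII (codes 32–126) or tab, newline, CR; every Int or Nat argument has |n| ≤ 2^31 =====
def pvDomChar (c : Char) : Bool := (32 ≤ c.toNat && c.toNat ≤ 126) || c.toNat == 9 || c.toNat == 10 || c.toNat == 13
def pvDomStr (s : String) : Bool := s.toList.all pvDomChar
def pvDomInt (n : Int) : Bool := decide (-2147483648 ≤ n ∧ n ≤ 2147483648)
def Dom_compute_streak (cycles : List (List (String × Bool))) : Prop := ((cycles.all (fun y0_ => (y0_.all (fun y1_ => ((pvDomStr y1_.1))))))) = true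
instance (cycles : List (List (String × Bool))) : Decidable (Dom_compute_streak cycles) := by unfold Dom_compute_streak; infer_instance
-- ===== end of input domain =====

-- B replaces A's reversed traversal with early break by a single forward pass with an accumulate/reset counter (objective: alternative decomposition).

-- truthiness of c.get("accepted") for Optional[bool]: None and False are falsy, True is truthy
def pvAccepted (c : List (String × Bool)) : Bool := ((PySem.Dict.mk c).get? "accepted").getD false

-- ===== PORT A =====
-- the 'for c in reversed(cycles)' loop with break: recursion on the reversed list
def compute_streak_loopA : List (List (String × Bool)) → Int → Int
  | [], streak => streak
  | c :: rest, streak => if pvAccepted c then compute_streak_loopA rest (streak + 1) else streak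

def compute_streak (cycles : List (List (String × Bool))) : Int :=
  compute_streak_loopA cycles.reverse 0

-- ===== PORT B =====
def compute_streak_alt (cycles : List (List (String × Bool))) : Int :=
  cycles.foldl (fun streak c => if pvAccepted c then streak + 1 else 0) 0

-- ===== PRECONDITION & SPEC =====
def Spec_compute_streak (cycles : List (List (String × Bool))) (out : Int) : Prop := out = compute_streak_alt cycles
instance (cycles : List (List (String × Bool))) (out : Int) : Decidable (Spec_compute_streak cycles out) := by unfold Spec_compute_streak; infer_instance

-- ===== CLAIM (what is proved, stated in full; the proofs are below) =====
def Claim_equal_compute_streak : Prop := ∀ (cycles : List (List (String × Bool))), Dom_compute_streak cycles → Spec_compute_streak cycles (compute_streak cycles)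

-- ===== LEMMAS AND PROOFS =====

-- A's loop with a nonzero start just shifts the result of the zero start
theorem loopA_shift (l : List (List (String × Bool))) (s : Int) :
    compute_streak_loopA l s = s + compute_streak_loopA l 0 := by
  induction l generalizing s with
  | nil => simp [compute_streak_loopA]
  | cons c t ih =>
    simp only [compute_streak_loopA]
    by_cases h : pvAccepted c = true
    · rw [if_pos h, if_pos h, ih (s + 1), ih (0 + 1)]; ring
    · simp [h]

theorem streak_eq (cycles : List (List (String × Bool))) :
    compute_streak_loopA cycles.reverse 0 =
      cycles.foldl (fun streak c => if pvAccepted c then streak + 1 else 0) 0 := by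
  induction cycles using List.reverseRecOn with
  | nil => simp [compute_streak_loopA]
  | append_singleton t c ih =>
    rw [List.reverse_append, List.reverse_singleton, List.singleton_append,
      List.foldl_append]
    simp only [compute_streak_loopA, List.foldl]
    by_cases h : pvAccepted c = true
    · rw [if_pos h, if_pos h, loopA_shift, ih]; ring
    · simp [h]

-- ===== VERDICT (by name: the statement is the Claim_ definition above) =====
theorem compute_streak_spec : Claim_equal_compute_streak := by
  intro cycles _
  unfold Spec_compute_streak compute_streak compute_streak_alt
  exact streak_eq cycles
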